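-- pv_equiv track=rewrite | github.com/shaswatsingh19/My-Learnings | CP website/WorkatTech/Arrays/Positive Cumulative Sum.py | getPositiveCumulativeSum
-- ===== SOURCE A (Python) =====
-- from typing import List
--
-- def getPositiveCumulativeSum(arr: List[int]) -> List[int]:
-- 	n = len(arr)
-- 	pos = []
-- 	if(arr[0] >0):pos.append(arr[0])
-- 	for i in range(1,n):
-- 		arr[i] = arr[i-1] + arr[i]
-- 		if(arr[i]>0):pos.append(arr[i])
--
-- 	return pos
-- ===== SOURCE B (Python) =====
-- from typing import List
--
-- def getPositiveCumulativeSum(arr: List[int]) -> List[int]: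
--     # Reverse scan: s starts as the total sum (the prefix sum ending at the last
--     # index); stepping left one element, subtracting it yields the previous
--     # prefix sum.  Positives are collected back-to-front, then reversed.
--     out = []
--     s = sum(arr)
--     for x in reversed(arr):
--         if s > 0:
--             out.append(s)
--         s -= x
--     out.reverse()
--     return out
-- ===== Notes on version B (the rewrite author's own statement) =====
-- stated objective: alternative
-- what changed: A builds the prefix-sum table in place left-to-right and collects positives as it goes; B never mutates or materialises the table: it starts from the total sum and scans the list right-to-left, recovering each earlier prefix sum by subtraction, collecting positives back-to-front and reversing once at the end.
import Mathlib
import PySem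

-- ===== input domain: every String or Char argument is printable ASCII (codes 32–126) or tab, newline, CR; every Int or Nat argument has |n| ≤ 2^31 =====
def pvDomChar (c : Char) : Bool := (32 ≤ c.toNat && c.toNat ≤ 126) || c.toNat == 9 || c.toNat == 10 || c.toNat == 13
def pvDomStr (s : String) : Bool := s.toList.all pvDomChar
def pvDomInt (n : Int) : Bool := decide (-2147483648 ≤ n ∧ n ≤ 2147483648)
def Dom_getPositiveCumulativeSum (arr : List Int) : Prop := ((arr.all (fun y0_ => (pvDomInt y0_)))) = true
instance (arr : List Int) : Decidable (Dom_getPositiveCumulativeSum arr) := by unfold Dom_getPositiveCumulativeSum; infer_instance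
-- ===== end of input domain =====

-- B replaces A's in-place left-to-right prefix-sum build with a right-to-left scan that
-- recovers each prefix sum from the running total by subtraction (no mutation of arr,
-- while A mutates it in place; the equivalence proved is about the return value).
-- Pre_ excludes only the empty list, on which A raises IndexError (B returns [] there).


-- ===== PORT A =====
def getPositiveCumulativeSum (arr : List Int) : List Int :=
  let n : Int := arr.length
  match PySem.List.pyGet? arr 0 with
  | none => []          -- Python raises IndexError here (arr = []); excluded by Pre_
  | some a0 =>
    let pos : List Int := if a0 > 0 then [a0] else []
    let res := (PySem.List.pyRange 1 n 1).foldl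
      (fun (st : List Int × List Int) i =>
        let v := PySem.List.pyGetD st.1 (i-1) 0 + PySem.List.pyGetD st.1 i 0
        (PySem.List.pySetD st.1 i v, if v > 0 then st.2 ++ [v] else st.2))
      (arr, pos)
    res.2

-- ===== PORT B =====
def getPositiveCumulativeSum_alt (arr : List Int) : List Int :=
  let res := arr.reverse.foldl
    (fun (st : List Int × Int) x =>
      ((if st.2 > 0 then st.1 ++ [st.2] else st.1), st.2 - x))
    ([], arr.sum)
  res.1.reverse

-- ===== PRECONDITION & SPEC =====
-- A unconditionally reads the first element, so it raises IndexError exactly on the empty list.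
def Pre_getPositiveCumulativeSum (arr : List Int) : Prop := arr ≠ []
instance (arr : List Int) : Decidable (Pre_getPositiveCumulativeSum arr) := by unfold Pre_getPositiveCumulativeSum; infer_instance
def pvWitness_getPositiveCumulativeSum : List Int := [2, -5, 4, 1]

def Spec_getPositiveCumulativeSum (arr : List Int) (out : List Int) : Prop := out = getPositiveCumulativeSum_alt arr
instance (arr : List Int) (out : List Int) : Decidable (Spec_getPositiveCumulativeSum arr out) := by unfold Spec_getPositiveCumulativeSum; infer_instance

-- ===== CLAIM (what is proved, stated in full; the proofs are below) =====
def Claim_equal_getPositiveCumulativeSum : Prop := ∀ (arr : List Int), Dom_getPositiveCumulativeSum arr → Pre_getPositiveCumulativeSum arr → Spec_getPositiveCumulativeSum arr (getPositiveCumulativeSum arr)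

-- ===== LEMMAS AND PROOFS =====

-- The full prefix-sum table of a0 :: t (what A's pass leaves in arr).
def pvPS (a0 : Int) (t : List Int) : List Int :=
  (List.range (t.length + 1)).map (fun k => ((a0 :: t).take (k + 1)).sum)

theorem pvPS_length (a0 : Int) (t : List Int) : (pvPS a0 t).length = t.length + 1 := by
  simp [pvPS]

theorem pvPS_getElem (a0 : Int) (t : List Int) (k : Nat) (hk : k < t.length + 1) :
    (pvPS a0 t)[k]'(by simp [pvPS_length, hk]) = ((a0 :: t).take (k + 1)).sum := by
  simp [pvPS]

-- generic append-frontier facts used by the state lemmas below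
theorem pvGetD_append_length (xs ys : List Int) (d : Int) (m : Nat) (h : xs.length = m) :
    (xs ++ ys).getD m d = ys.getD 0 d := by
  subst h
  rcases ys with _ | ⟨y, ys⟩
  · simp [List.getD]
  · rw [List.getD_eq_getElem _ _ (by simp), List.getElem_append_right (by simp)]
    simp

theorem pvSet_append_length (xs ys : List Int) (v : Int) (m : Nat) (h : xs.length = m) :
    (xs ++ ys).set m v = xs ++ ys.set 0 v := by
  subst h
  simp

-- reading arr[m-1] in the mid-pass state: the finished prefix sum
theorem pvS_get_prev (a0 : Int) (t : List Int) (m : Nat) (h1 : 1 ≤ m) (h2 : m ≤ t.length) :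
    PySem.List.pyGetD ((pvPS a0 t).take m ++ (a0 :: t).drop m) ((m : Int) - 1) 0 =
      ((a0 :: t).take m).sum := by
  have hc : ((m : Int) - 1) = ((m - 1 : Nat) : Int) := by omega
  rw [hc, PySem.List.pyGetD_natCast,
      List.getD_append _ _ _ _ (by simp [pvPS_length]; omega),
      List.getD_eq_getElem _ _ (by simp [pvPS_length]; omega)]
  rw [List.getElem_take, pvPS_getElem a0 t (m - 1) (by omega)]
  have hm : m - 1 + 1 = m := by omega
  rw [hm]

-- reading arr[m] in the mid-pass state: the untouched original element
theorem pvS_get_cur (a0 : Int) (t : List Int) (m : Nat) (h2 : m ≤ t.length) :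
    PySem.List.pyGetD ((pvPS a0 t).take m ++ (a0 :: t).drop m) (m : Int) 0 =
      (a0 :: t).getD m 0 := by
  have hl : ((pvPS a0 t).take m).length = m := by simp [pvPS_length]; omega
  rw [PySem.List.pyGetD_natCast, pvGetD_append_length _ _ _ _ hl,
      List.drop_eq_getElem_cons (show m < (a0 :: t).length by simp; omega),
      List.getD_cons_zero, List.getD_eq_getElem _ _ (by simp; omega)]

-- taking one more prefix-sum entry
theorem pvPS_take_succ (a0 : Int) (t : List Int) (m : Nat) (h2 : m ≤ t.length) :
    (pvPS a0 t).take (m + 1) = (pvPS a0 t).take m ++ [((a0 :: t).take (m + 1)).sum] := by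
  rw [List.take_succ_eq_append_getElem (by simp [pvPS_length]; omega),
      pvPS_getElem a0 t m (by omega)]

-- writing arr[m] in the mid-pass state advances the frontier by one
theorem pvS_set (a0 : Int) (t : List Int) (m : Nat) (h2 : m ≤ t.length) :
    PySem.List.pySetD ((pvPS a0 t).take m ++ (a0 :: t).drop m) (m : Int)
        (((a0 :: t).take (m + 1)).sum) =
      (pvPS a0 t).take (m + 1) ++ (a0 :: t).drop (m + 1) := by
  have hl : ((pvPS a0 t).take m).length = m := by simp [pvPS_length]; omega
  rw [PySem.List.pySetD_natCast, pvSet_append_length _ _ _ _ hl,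
      List.drop_eq_getElem_cons (show m < (a0 :: t).length by simp; omega),
      List.set_cons_zero, pvPS_take_succ a0 t m h2]
  simp

-- the running sum recurrence
theorem pvSum_succ (a0 : Int) (t : List Int) (m : Nat) (h2 : m ≤ t.length) :
    ((a0 :: t).take m).sum + (a0 :: t).getD m 0 = ((a0 :: t).take (m + 1)).sum := by
  rw [List.getD_eq_getElem _ _ (by simp; omega),
      List.sum_take_succ _ m (by simp; omega)]

-- the one-entry prefix of the table is just the first element
theorem pvTake_one (a0 : Int) (t : List Int) : (pvPS a0 t).take 1 = [a0] := by
  rw [pvPS_take_succ a0 t 0 (by omega)]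
  simp

-- invariant lemma for A's fused fold
theorem pvA_inv (a0 : Int) (t : List Int) (m : Nat) (h1 : 1 ≤ m) (h2 : m ≤ t.length + 1) :
    (PySem.List.pyRange 1 (m : Int) 1).foldl
      (fun (st : List Int × List Int) i =>
        let v := PySem.List.pyGetD st.1 (i-1) 0 + PySem.List.pyGetD st.1 i 0
        (PySem.List.pySetD st.1 i v, if v > 0 then st.2 ++ [v] else st.2))
      (a0 :: t, if a0 > 0 then [a0] else []) =
    ((pvPS a0 t).take m ++ (a0 :: t).drop m,
     ((pvPS a0 t).take m).filter (fun x => x > 0)) := by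
  induction m with
  | zero => omega
  | succ m ih =>
    rcases Nat.eq_zero_or_pos m with hm | hm
    · subst hm
      rw [show (((1:Nat)):Int) = 1 by simp, PySem.List.pyRange_one_eq_nil (by omega)]
      rw [pvTake_one a0 t]
      simp [List.filter_singleton]
    · have hmt : m ≤ t.length := by omega
      rw [show (((m+1:Nat)):Int) = (m:Int)+1 by push_cast; ring,
          PySem.List.pyRange_one_succ_right (by omega : (1:Int) ≤ (m:Int)),
          List.foldl_append, ih hm (by omega)]
      simp only [List.foldl_cons, List.foldl_nil]
      rw [pvS_get_prev a0 t m hm hmt, pvS_get_cur a0 t m hmt, pvSum_succ a0 t m hmt,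
          pvS_set a0 t m hmt, pvPS_take_succ a0 t m hmt, List.filter_append]
      simp only [List.filter_singleton]
      split
      · simp_all
      · rename_i h
        rw [List.take_succ_cons, List.sum_cons] at h
        simp at h
        simp [not_lt.mpr h]

-- === B side: prefix sums with an offset, defined structurally ===
def pvPSfrom (s : Int) : List Int → List Int
  | [] => []
  | x :: r => (s + x) :: pvPSfrom (s + x) r

theorem pvPSfrom_map (s : Int) (l : List Int) :
    pvPSfrom s l = (List.range l.length).map (fun k => s + (l.take (k + 1)).sum) := by
  induction l generalizing s with
  | nil => simp [pvPSfrom]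
  | cons x r ih =>
    rw [pvPSfrom, ih (s + x)]
    simp [List.range_succ_eq_map, List.map_map, Function.comp]
    intro a _
    ring

theorem pvPSfrom_eq_pvPS (a0 : Int) (t : List Int) :
    pvPSfrom 0 (a0 :: t) = pvPS a0 t := by
  rw [pvPSfrom_map, pvPS]
  simp

-- invariant for B's reverse fold: starting from the total sum over a suffix,
-- it collects the filtered offset prefix sums in reverse order
theorem pvB_inv (xs : List Int) (s : Int) (acc : List Int) :
    xs.reverse.foldl
      (fun (st : List Int × Int) x =>
        ((if st.2 > 0 then st.1 ++ [st.2] else st.1), st.2 - x))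
      (acc, s + xs.sum) =
    (acc ++ ((pvPSfrom s xs).filter (fun v => v > 0)).reverse, s) := by
  induction xs generalizing s acc with
  | nil => simp [pvPSfrom]
  | cons x r ih =>
    rw [List.reverse_cons, List.foldl_append,
        show s + (x :: r).sum = (s + x) + r.sum by simp; ring, ih (s + x) acc]
    simp only [List.foldl_cons, List.foldl_nil, pvPSfrom, List.filter_cons]
    split
    · rename_i h
      simp at h
      simp [h]
    · rename_i h
      simp at h
      simp [not_lt.mpr h]

-- B's port computes exactly the filtered prefix sums
theorem pvB_eq (arr : List Int) :
    getPositiveCumulativeSum_alt arr = (pvPSfrom 0 arr).filter (fun v => v > 0) := by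
  show (arr.reverse.foldl
      (fun (st : List Int × Int) x =>
        ((if st.2 > 0 then st.1 ++ [st.2] else st.1), st.2 - x))
      ([], arr.sum)).1.reverse = _
  have hB := pvB_inv arr 0 []
  rw [zero_add] at hB
  rw [hB]
  simp

-- ===== VERDICT (by name: the statement is the Claim_ definition above) =====
theorem getPositiveCumulativeSum_spec : Claim_equal_getPositiveCumulativeSum := by
  intro arr _ hpre
  unfold Spec_getPositiveCumulativeSum
  obtain ⟨a0, t, rfl⟩ : ∃ a0 t, arr = a0 :: t := by
    cases arr with
    | nil => exact absurd rfl hpre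
    | cons a0 t => exact ⟨a0, t, rfl⟩
  rw [pvB_eq]
  show (getPositiveCumulativeSum (a0 :: t)) = _
  unfold getPositiveCumulativeSum
  simp only [PySem.List.pyGet?, PySem.List.pyIdx?]
  norm_num
  have hA := pvA_inv a0 t (t.length + 1) (by omega) (le_refl _)
  push_cast at hA
  rw [hA]
  rw [List.take_of_length_le (le_of_eq (pvPS_length a0 t))]
  rw [pvPSfrom_eq_pvPS]
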